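-- pv_equiv track=rewrite | github.com/GitMonsters/octotetrahedral-agi | arc-puzzle-catalog/re-arc/solves/56be08c1/solver.py | _smallest_block
-- ===== SOURCE A (Python) =====
-- def _smallest_block(same_set, dim):
--     for b in range(1, dim):
--         expected = set(range(b, dim, b + 1))
--         if expected and expected.issubset(same_set):
--             n = len(expected) + 1
--             if n * b + len(expected) == dim:
--                 return b
--     return None
-- ===== SOURCE B (Python) =====
-- def _smallest_block(same_set, dim):
--     # Only b with (b+1) dividing (dim+1) can satisfy A's length equation, so
--     # enumerate divisors d = b+1 of dim+1 via trial division up to sqrt, in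
--     # increasing order, and membership-check the striped positions against a set.
--     if dim < 2:
--         return None
--     s = set(same_set)
--     m = dim + 1
--     divs = set()
--     i = 1
--     while i * i <= m:
--         if m % i == 0:
--             divs.add(i)
--             divs.add(m // i)
--         i += 1
--     for d in sorted(divs):
--         if 2 <= d <= dim and s.issuperset(range(d - 1, dim, d)):
--             return d - 1
--     return None
-- ===== Notes on version B (the rewrite author's own statement) =====
-- stated objective: faster
-- what changed: A scans every b in range(1, dim) and builds the full expected stripe set for each; B derives that A's length equation holds iff (b+1) divides (dim+1), enumerates the divisors of dim+1 by trial division up to sqrt(dim+1), and membership-checks the stripe positions only for those candidate b against a prebuilt set.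
import Mathlib
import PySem

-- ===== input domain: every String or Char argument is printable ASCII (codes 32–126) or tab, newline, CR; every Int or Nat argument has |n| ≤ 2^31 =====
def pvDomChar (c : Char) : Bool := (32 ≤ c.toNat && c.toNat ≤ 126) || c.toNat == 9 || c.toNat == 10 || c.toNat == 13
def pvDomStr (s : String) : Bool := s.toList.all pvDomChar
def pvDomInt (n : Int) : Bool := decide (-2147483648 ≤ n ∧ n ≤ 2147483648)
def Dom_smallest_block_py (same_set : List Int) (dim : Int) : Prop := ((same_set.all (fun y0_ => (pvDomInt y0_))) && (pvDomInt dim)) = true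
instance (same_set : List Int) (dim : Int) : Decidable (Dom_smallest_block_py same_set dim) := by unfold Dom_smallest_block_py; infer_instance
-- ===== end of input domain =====

-- B replaces A's scan of all b in range(1, dim) by enumerating only the divisors d = b+1
-- of dim+1 (found by trial division up to sqrt), since A's length equation holds iff (b+1) | (dim+1).

-- ===== PORT A =====
-- literal transliteration of A's for-loop over range(1, dim)
def pvALoop (same_set : List Int) (dim : Int) : List Int → Option Int
  | [] => none
  | b :: rest =>
    let expected : PySem.Set Int := PySem.Set.ofList (PySem.List.pyRange b dim (b + 1))
    if expected ≠ [] ∧ PySem.Set.issubset expected same_set = true then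
      let n : Int := PySem.List.len expected + 1
      if n * b + PySem.List.len expected = dim then some b
      else pvALoop same_set dim rest
    else pvALoop same_set dim rest

def smallest_block_py (same_set : List Int) (dim : Int) : Option Int :=
  pvALoop same_set dim (PySem.List.pyRange 1 dim 1)

-- ===== PORT B =====
-- the while-loop collecting divisors of m by trial division (i*i <= m)
def pvBDivs (m i : Int) (divs : PySem.Set Int) : PySem.Set Int :=
  if i * i ≤ m then
    pvBDivs m (i + 1)
      (if PySem.Int.mod m i = 0 then
         PySem.Set.add (PySem.Set.add divs i) (PySem.Int.floordiv m i)
       else divs)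
  else divs
termination_by (m + 1 - i).toNat
decreasing_by
  rename_i h
  have hi : i ≤ m := by
    by_cases h0 : i ≤ 0
    · nlinarith
    · nlinarith
  omega

-- the for-loop over sorted(divs)
def pvBLoop (s : PySem.Set Int) (dim : Int) : List Int → Option Int
  | [] => none
  | d :: rest =>
    if 2 ≤ d ∧ d ≤ dim ∧ PySem.Set.issuperset s (PySem.List.pyRange (d - 1) dim d) = true then
      some (d - 1)
    else pvBLoop s dim rest

def smallest_block_py_alt (same_set : List Int) (dim : Int) : Option Int :=
  if dim < 2 then none
  else
    let s : PySem.Set Int := PySem.Set.ofList same_set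
    let m : Int := dim + 1
    let divs : PySem.Set Int := pvBDivs m 1 PySem.Set.empty
    pvBLoop s dim (PySem.List.sorted divs (fun x => x))

-- ===== PRECONDITION & SPEC =====
def Spec_smallest_block_py (same_set : List Int) (dim : Int) (out : Option Int) : Prop := out = smallest_block_py_alt same_set dim
instance (same_set : List Int) (dim : Int) (out : Option Int) : Decidable (Spec_smallest_block_py same_set dim out) := by unfold Spec_smallest_block_py; infer_instance

-- ===== CLAIM (what is proved, stated in full; the proofs are below) =====
def Claim_equal_smallest_block_py : Prop := ∀ (same_set : List Int) (dim : Int), Dom_smallest_block_py same_set dim → Spec_smallest_block_py same_set dim (smallest_block_py same_set dim)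

-- ===== LEMMAS AND PROOFS =====

-- the loop conditions as propositions
def pvCondA (ss : List Int) (dim b : Int) : Bool :=
  decide ((PySem.Set.ofList (PySem.List.pyRange b dim (b + 1)) ≠ [] ∧
    PySem.Set.issubset (PySem.Set.ofList (PySem.List.pyRange b dim (b + 1))) ss = true) ∧
  (PySem.List.len (PySem.Set.ofList (PySem.List.pyRange b dim (b + 1))) + 1) * b +
    PySem.List.len (PySem.Set.ofList (PySem.List.pyRange b dim (b + 1))) = dim)

def pvCondB (ss : List Int) (dim d : Int) : Bool :=
  decide (2 ≤ d ∧ d ≤ dim ∧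
    PySem.Set.issuperset (PySem.Set.ofList ss) (PySem.List.pyRange (d - 1) dim d) = true)

-- generic first-match function and its characterisation on strictly increasing lists
def pvFirst (P : Int → Bool) : List Int → Option Int
  | [] => none
  | x :: r => if P x then some x else pvFirst P r

theorem pvFirst_eq_none_iff (P : Int → Bool) (l : List Int) :
    pvFirst P l = none ↔ ∀ y ∈ l, ¬ P y = true := by
  induction l with
  | nil => simp [pvFirst]
  | cons x r ih =>
    by_cases hx : P x = true <;> simp [pvFirst, hx, ih]

theorem pvFirst_eq_some_iff (P : Int → Bool) (l : List Int)
    (hl : l.Pairwise (· < ·)) (x : Int) :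
    pvFirst P l = some x ↔ x ∈ l ∧ P x = true ∧ ∀ y ∈ l, P y = true → x ≤ y := by
  induction l with
  | nil => simp [pvFirst]
  | cons a r ih =>
    rcases List.pairwise_cons.mp hl with ⟨ha, hr⟩
    by_cases hx : P a = true
    · simp only [pvFirst, if_pos hx, Option.some.injEq]
      constructor
      · rintro rfl
        refine ⟨List.mem_cons_self, hx, ?_⟩
        intro y hy _
        rcases List.mem_cons.mp hy with rfl | hy
        · exact le_refl _
        · exact le_of_lt (ha y hy)
      · rintro ⟨hmem, hPx, hmin⟩
        rcases List.mem_cons.mp hmem with rfl | hmem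
        · rfl
        · exact absurd (hmin a List.mem_cons_self hx) (not_le.mpr (ha x hmem))
    · simp only [pvFirst, if_neg hx]
      rw [ih hr]
      constructor
      · rintro ⟨hmem, hPx, hmin⟩
        refine ⟨List.mem_cons_of_mem _ hmem, hPx, ?_⟩
        intro y hy hPy
        rcases List.mem_cons.mp hy with rfl | hy
        · exact absurd hPy hx
        · exact hmin y hy hPy
      · rintro ⟨hmem, hPx, hmin⟩
        rcases List.mem_cons.mp hmem with rfl | hmem
        · exact absurd hPx hx
        · exact ⟨hmem, hPx, fun y hy hPy => hmin y (List.mem_cons_of_mem _ hy) hPy⟩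

theorem pvALoop_eq_first (ss : List Int) (dim : Int) (l : List Int) :
    pvALoop ss dim l = pvFirst (pvCondA ss dim) l := by
  induction l with
  | nil => rfl
  | cons b rest ih =>
    simp only [pvALoop, pvFirst, pvCondA, decide_eq_true_eq, ih]
    split_ifs <;> first | rfl | tauto

theorem pvBLoop_eq_first (ss : List Int) (dim : Int) (l : List Int) :
    pvBLoop (PySem.Set.ofList ss) dim l = (pvFirst (pvCondB ss dim) l).map (fun d => d - 1) := by
  induction l with
  | nil => rfl
  | cons d rest ih =>
    simp only [pvBLoop, pvFirst, pvCondB, decide_eq_true_eq, ih]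
    split_ifs <;> rfl

-- arithmetic characterisation of A's condition: the length equation holds iff (b+1) | (dim+1)
theorem pvCondA_iff (ss : List Int) (dim b : Int) (hb : 1 ≤ b) (hbd : b < dim) :
    pvCondA ss dim b = true ↔ ((b + 1) ∣ (dim + 1) ∧ ∀ x ∈ PySem.List.pyRange b dim (b + 1), x ∈ ss) := by
  have hpos : (0:Int) < b + 1 := by omega
  have harg : dim - b + (b + 1) - 1 = dim := by ring
  have hrng : PySem.List.pyRange b dim (b + 1) =
      List.map (fun k : ℕ => b + (b + 1) * (k : Int)) (List.range ((dim / (b + 1)).toNat)) := by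
    rw [PySem.List.pyRange_of_pos _ _ hpos, if_pos hbd, harg]
  have hinj : Function.Injective (fun k : ℕ => b + (b + 1) * (k : Int)) := by
    intro k1 k2 h
    simp only at h
    have h' : (b + 1) * (k1 : Int) = (b + 1) * (k2 : Int) := by omega
    have := mul_left_cancel₀ (show (b:Int) + 1 ≠ 0 by omega) h'
    exact_mod_cast this
  have hnodup : (PySem.List.pyRange b dim (b + 1)).Nodup := by
    rw [hrng]; exact List.Nodup.map hinj (List.nodup_range)
  have hofl : PySem.Set.ofList (PySem.List.pyRange b dim (b + 1)) = PySem.List.pyRange b dim (b + 1) :=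
    PySem.Set.ofList_eq_self_of_nodup _ hnodup
  have hq0 : 0 ≤ dim / (b + 1) := Int.ediv_nonneg (by omega) (by omega)
  have hlen : PySem.List.len (PySem.List.pyRange b dim (b + 1)) = dim / (b + 1) := by
    simp only [PySem.List.len_eq, hrng, List.length_map, List.length_range]
    exact Int.toNat_of_nonneg hq0
  have hqr : (b + 1) * (dim / (b + 1)) + dim % (b + 1) = dim := Int.ediv_add_emod dim (b + 1)
  have hr0 : 0 ≤ dim % (b + 1) := Int.emod_nonneg dim (by omega)
  have hrlt : dim % (b + 1) < b + 1 := Int.emod_lt_of_pos dim hpos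
  have hbmem : b ∈ PySem.List.pyRange b dim (b + 1) :=
    (PySem.List.mem_pyRange_iff_of_pos hpos b).mpr ⟨le_refl b, hbd, by simp⟩
  have hne : PySem.List.pyRange b dim (b + 1) ≠ [] := List.ne_nil_of_mem hbmem
  have key : ((dim / (b + 1) + 1) * b + dim / (b + 1) = dim) ↔ ((b + 1) ∣ (dim + 1)) := by
    constructor
    · intro he
      refine ⟨dim / (b + 1) + 1, ?_⟩
      have h1 : (b + 1) * (dim / (b + 1) + 1) = (b + 1) * (dim / (b + 1)) + (b + 1) := by ring
      have h2 : (dim / (b + 1) + 1) * b + dim / (b + 1) = (b + 1) * (dim / (b + 1)) + b := by ring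
      linarith
    · rintro ⟨c, hc⟩
      have h2 : (b + 1) * (c - dim / (b + 1)) = dim % (b + 1) + 1 := by
        have e1 : (b + 1) * (c - dim / (b + 1)) = (b + 1) * c - (b + 1) * (dim / (b + 1)) := by ring
        rw [e1]; linarith
      have ht1 : 0 < c - dim / (b + 1) := by
        by_contra hcq
        push_neg at hcq
        nlinarith
      have ht2 : c - dim / (b + 1) < 2 := by
        by_contra hcq
        push_neg at hcq
        nlinarith
      have ht : c - dim / (b + 1) = 1 := by omega
      rw [ht, mul_one] at h2
      have h2' : (dim / (b + 1) + 1) * b + dim / (b + 1) = (b + 1) * (dim / (b + 1)) + b := by ring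
      linarith
  unfold pvCondA
  rw [decide_eq_true_eq, hofl, hlen, PySem.Set.issubset_iff]
  constructor
  · rintro ⟨⟨-, hsub⟩, heq⟩
    exact ⟨key.mp heq, hsub⟩
  · rintro ⟨hdvd, hsub⟩
    exact ⟨⟨hne, hsub⟩, key.mpr hdvd⟩

-- B's condition unfolded
theorem pvCondB_iff (ss : List Int) (dim d : Int) :
    pvCondB ss dim d = true ↔ (2 ≤ d ∧ d ≤ dim ∧ ∀ x ∈ PySem.List.pyRange (d - 1) dim d, x ∈ ss) := by
  unfold pvCondB
  simp [PySem.Set.issuperset_iff, PySem.Set.mem_ofList]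

-- divisor collection: divs is preserved
theorem pvBDivs_mono (m i : Int) (divs : PySem.Set Int) : divs ⊆ pvBDivs m i divs := by
  fun_induction pvBDivs m i divs with
  | case1 i divs h ih =>
    intro x hx
    apply ih
    by_cases hm : PySem.Int.mod m i = 0
    · simp [hm, PySem.Set.mem_add, hx]
    · simpa [hm] using hx
  | case2 i divs h => exact fun x hx => hx

-- divisor collection: soundness — every collected element is a positive divisor of m
theorem pvBDivs_sound (m i : Int) (divs : PySem.Set Int) (d : Int) :
    1 ≤ i → d ∈ pvBDivs m i divs → d ∈ divs ∨ (d ∣ m ∧ 1 ≤ d) := by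
  fun_induction pvBDivs m i divs with
  | case1 i divs h ih =>
    intro hi hd
    rcases ih (by omega) hd with hmem | hdm
    · by_cases hm : PySem.Int.mod m i = 0
      · simp only [hm, if_pos] at hmem
        have hidvd : i ∣ m := by
          rw [PySem.Int.mod_eq_emod_of_pos (by omega)] at hm
          exact Int.dvd_of_emod_eq_zero hm
        rcases (PySem.Set.mem_add _ _ _).mp hmem with hmem2 | rfl
        · rcases (PySem.Set.mem_add _ _ _).mp hmem2 with hmem3 | rfl
          · exact Or.inl hmem3
          · exact Or.inr ⟨hidvd, hi⟩
        · right
          rw [PySem.Int.floordiv_eq_ediv_of_pos (by omega)]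
          have hq : m / i * i = m := Int.ediv_mul_cancel hidvd
          refine ⟨⟨i, hq.symm⟩, ?_⟩
          by_contra hq1
          push_neg at hq1
          nlinarith
      · simp only [hm, if_neg] at hmem
        exact Or.inl hmem
    · exact Or.inr hdm
  | case2 i divs h => exact fun _ hd => Or.inl hd

-- divisor collection: every divisor pair whose small member is ≥ i is captured
theorem pvBDivs_cap (m i : Int) (divs : PySem.Set Int) (j : Int) :
    1 ≤ i → i ≤ j → j * j ≤ m → PySem.Int.mod m j = 0 →
    j ∈ pvBDivs m i divs ∧ PySem.Int.floordiv m j ∈ pvBDivs m i divs := by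
  fun_induction pvBDivs m i divs with
  | case1 i divs h ih =>
    intro hi hij hjj hjm
    by_cases hji : j = i
    · subst hji
      constructor <;>
        exact pvBDivs_mono _ _ _ (by simp [hjm, PySem.Set.mem_add])
    · exact ih (by omega) (by omega) hjj hjm
  | case2 i divs h =>
    intro hi hij hjj hjm
    exact absurd (by nlinarith : i * i ≤ m) h

-- divisor collection: completeness at i = 1 — every positive divisor of m is collected
theorem pvBDivs_complete (m d : Int) (hm : 1 ≤ m) (hd1 : 1 ≤ d) (hdm : d ∣ m) :
    d ∈ pvBDivs m 1 PySem.Set.empty := by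
  have hmod : PySem.Int.mod m d = 0 := by
    rw [PySem.Int.mod_eq_emod_of_pos (by omega)]
    exact Int.emod_eq_zero_of_dvd hdm
  by_cases hsq : d * d ≤ m
  · exact (pvBDivs_cap m 1 _ d (le_refl 1) hd1 hsq hmod).1
  · have hedm : m / d * d = m := Int.ediv_mul_cancel hdm
    have he1 : 1 ≤ m / d := by
      by_contra h1
      push_neg at h1
      nlinarith
    have hed : m / d < d := by nlinarith
    have hee : m / d * (m / d) ≤ m := by nlinarith
    have hem : m / d ∣ m := ⟨d, hedm.symm⟩
    have hmode : PySem.Int.mod m (m / d) = 0 := by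
      rw [PySem.Int.mod_eq_emod_of_pos (by omega)]
      exact Int.emod_eq_zero_of_dvd hem
    have hfd : PySem.Int.floordiv m (m / d) = d := by
      rw [PySem.Int.floordiv_eq_ediv_of_pos (by omega)]
      have hcl : m / d * d / (m / d) = d := Int.mul_ediv_cancel_left _ (by omega : m / d ≠ 0)
      rwa [hedm] at hcl
    have := (pvBDivs_cap m 1 PySem.Set.empty (m / d) (le_refl 1) he1 hee hmode).2
    rwa [hfd] at this

theorem pvBDivs_nodup (m i : Int) (divs : PySem.Set Int) :
    divs.Nodup → (pvBDivs m i divs).Nodup := by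
  fun_induction pvBDivs m i divs with
  | case1 i divs h ih =>
    intro hnd
    apply ih
    by_cases hm : PySem.Int.mod m i = 0
    · simp only [hm, if_pos]
      exact PySem.Set.nodup_add _ _ (PySem.Set.nodup_add _ _ hnd)
    · simpa [hm] using hnd
  | case2 i divs h => exact fun hnd => hnd

-- ===== VERDICT (by name: the statement is the Claim_ definition above) =====
theorem smallest_block_py_spec : Claim_equal_smallest_block_py := by
  intro ss dim _
  unfold Spec_smallest_block_py
  by_cases hdim : dim < 2
  · rw [smallest_block_py, PySem.List.pyRange_one_eq_nil (by omega : dim ≤ (1:Int))]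
    rw [smallest_block_py_alt, if_pos hdim]
    rfl
  · push_neg at hdim
    have hmne : ¬ dim < 2 := by omega
    rw [smallest_block_py, pvALoop_eq_first]
    rw [smallest_block_py_alt, if_neg hmne]
    simp only
    rw [pvBLoop_eq_first]
    have hA_pair : (PySem.List.pyRange 1 dim 1).Pairwise (· < ·) := PySem.List.pairwise_lt_pyRange_one 1 dim
    have hB_memdiv : ∀ x : Int, x ∈ PySem.List.sorted (pvBDivs (dim + 1) 1 PySem.Set.empty) (fun x => x) ↔
        (x ∣ (dim + 1) ∧ 1 ≤ x) := by
      intro x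
      rw [PySem.List.mem_sorted]
      constructor
      · intro hx
        rcases pvBDivs_sound (dim + 1) 1 PySem.Set.empty x (le_refl 1) hx with hemp | hok
        · simp [PySem.Set.empty] at hemp
        · exact hok
      · rintro ⟨hdvd, hx1⟩
        exact pvBDivs_complete (dim + 1) x (by omega) hx1 hdvd
    have hB_pair : (PySem.List.sorted (pvBDivs (dim + 1) 1 PySem.Set.empty) (fun x => x)).Pairwise (· < ·) := by
      have h1 := PySem.List.sorted_pairwise (pvBDivs (dim + 1) 1 PySem.Set.empty) (fun x => x)
      have h2 : (PySem.List.sorted (pvBDivs (dim + 1) 1 PySem.Set.empty) (fun x => x)).Nodup := by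
        have hperm := PySem.List.sorted_perm (pvBDivs (dim + 1) 1 PySem.Set.empty) (fun x => x) false
        exact (hperm.nodup_iff).mpr (pvBDivs_nodup (dim + 1) 1 PySem.Set.empty (by simp [PySem.Set.empty]))
      exact (h1.and h2).imp (fun hab => lt_of_le_of_ne hab.1 hab.2)
    have corr1 : ∀ b : Int, b ∈ PySem.List.pyRange 1 dim 1 → pvCondA ss dim b = true →
        (b + 1) ∈ PySem.List.sorted (pvBDivs (dim + 1) 1 PySem.Set.empty) (fun x => x) ∧ pvCondB ss dim (b + 1) = true := by
      intro b hmem hP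
      have hb := (PySem.List.mem_pyRange_one).mp hmem
      rcases (pvCondA_iff ss dim b (by omega) (by omega)).mp hP with ⟨hdvd, hsub⟩
      refine ⟨(hB_memdiv (b + 1)).mpr ⟨hdvd, by omega⟩, ?_⟩
      rw [pvCondB_iff]
      have harg : b + 1 - 1 = b := by ring
      rw [harg]
      exact ⟨by omega, by omega, hsub⟩
    have corr2 : ∀ d : Int, d ∈ PySem.List.sorted (pvBDivs (dim + 1) 1 PySem.Set.empty) (fun x => x) →
        pvCondB ss dim d = true → (d - 1) ∈ PySem.List.pyRange 1 dim 1 ∧ pvCondA ss dim (d - 1) = true := by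
      intro d hmem hP
      rcases (hB_memdiv d).mp hmem with ⟨hdvd, -⟩
      rcases (pvCondB_iff ss dim d).mp hP with ⟨hd2, hddim, hsub⟩
      refine ⟨(PySem.List.mem_pyRange_one).mpr ⟨by omega, by omega⟩, ?_⟩
      rw [pvCondA_iff ss dim (d - 1) (by omega) (by omega)]
      have harg : d - 1 + 1 = d := by ring
      rw [harg]
      exact ⟨hdvd, hsub⟩
    cases hfa : pvFirst (pvCondA ss dim) (PySem.List.pyRange 1 dim 1) with
    | none =>
      rw [pvFirst_eq_none_iff] at hfa
      have hfb : pvFirst (pvCondB ss dim) (PySem.List.sorted (pvBDivs (dim + 1) 1 PySem.Set.empty) (fun x => x)) = none := by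
        rw [pvFirst_eq_none_iff]
        intro d hd hPd
        rcases corr2 d hd hPd with ⟨hmem, hcond⟩
        exact hfa (d - 1) hmem hcond
      rw [hfb]
      rfl
    | some b =>
      rcases (pvFirst_eq_some_iff _ _ hA_pair b).mp hfa with ⟨hmem, hP, hmin⟩
      rcases corr1 b hmem hP with ⟨hmemB, hPB⟩
      have hfb : pvFirst (pvCondB ss dim) (PySem.List.sorted (pvBDivs (dim + 1) 1 PySem.Set.empty) (fun x => x)) = some (b + 1) := by
        rw [pvFirst_eq_some_iff _ _ hB_pair]
        refine ⟨hmemB, hPB, ?_⟩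
        intro d hd hPd
        rcases corr2 d hd hPd with ⟨hmemA, hcondA⟩
        have := hmin (d - 1) hmemA hcondA
        omega
      rw [hfb]
      simp
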